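-- pv_equiv track=rewrite | github.com/takahashiJe/matsuo_llm2025_mainCompe | scripts/train_lora.py | find_first_tag_pos
-- ===== SOURCE A (Python) =====
-- from typing import Dict, List, Optional, Tuple
--
-- def find_first_tag_pos(text: str, tags: List[str]) -> Optional[Tuple[int, str]]:
--     """最初に出現したタグ位置（開始インデックス, タグ文字列）を返す。"""
--     found = []
--     for tag in tags:
--         idx = text.find(tag)
--         if idx >= 0:
--             found.append((idx, tag))
--     if not found:
--         return None
--     found.sort(key=lambda x: x[0])
--     return found[0]
-- ===== SOURCE B (Python) =====
-- from typing import List, Optional, Tuple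
--
--
-- def find_first_tag_pos(text: str, tags: List[str]) -> Optional[Tuple[int, str]]:
--     """Single pass over the tags keeping the best (smallest index, earliest tag) so far."""
--     best = None
--     for tag in tags:
--         idx = text.find(tag)
--         if idx >= 0 and (best is None or idx < best[0]):
--             best = (idx, tag)
--     return best
-- ===== Notes on version B (the rewrite author's own statement) =====
-- stated objective: simpler
-- what changed: Replaces collecting all hits into a list and stably sorting it by index with a single running-minimum pass that keeps the best (index, tag) pair, preserving the first-tag tie-break via strict comparison.
import Mathlib
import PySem

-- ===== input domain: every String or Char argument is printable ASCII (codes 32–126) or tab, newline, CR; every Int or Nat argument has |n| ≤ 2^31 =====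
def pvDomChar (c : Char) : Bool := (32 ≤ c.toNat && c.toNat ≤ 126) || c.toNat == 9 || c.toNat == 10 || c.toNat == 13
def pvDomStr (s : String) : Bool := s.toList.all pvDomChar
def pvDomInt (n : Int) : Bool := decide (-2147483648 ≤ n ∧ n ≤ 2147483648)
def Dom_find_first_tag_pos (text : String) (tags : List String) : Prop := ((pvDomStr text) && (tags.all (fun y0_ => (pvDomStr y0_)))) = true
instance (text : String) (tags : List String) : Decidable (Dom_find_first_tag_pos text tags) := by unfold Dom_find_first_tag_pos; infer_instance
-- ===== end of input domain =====

-- B replaces A's collect-all-hits-then-stable-sort with a single running-minimum pass (same result; first tag wins ties).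

-- ===== PORT A =====
-- A: collect (find-index, tag) for every tag that occurs, stable-sort by index, return the first.
def find_first_tag_pos (text : String) (tags : List String) : Option (Int × String) :=
  let found := tags.foldl (fun acc tag =>
    let idx := PySem.Str.find text tag
    if idx ≥ 0 then acc ++ [(idx, tag)] else acc) []
  if found = [] then none
  else PySem.List.pyGet? (PySem.List.sorted found (fun x => x.1)) 0

-- ===== PORT B =====
-- B's loop body: 'if idx >= 0 and (best is None or idx < best[0]): best = (idx, tag)'
def pvAltStep (text : String) (best : Option (Int × String)) (tag : String) : Option (Int × String) :=
  let idx := PySem.Str.find text tag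
  if idx ≥ 0 && (match best with | none => true | some p => decide (idx < p.1)) then
    some (idx, tag)
  else best

-- B: one pass keeping the best (smallest index; earlier tag wins ties via strict <).
def find_first_tag_pos_alt (text : String) (tags : List String) : Option (Int × String) :=
  tags.foldl (pvAltStep text) none

-- ===== PRECONDITION & SPEC =====
def Spec_find_first_tag_pos (text : String) (tags : List String) (out : Option (Int × String)) : Prop := out = find_first_tag_pos_alt text tags
instance (text : String) (tags : List String) (out : Option (Int × String)) : Decidable (Spec_find_first_tag_pos text tags out) := by unfold Spec_find_first_tag_pos; infer_instance

-- ===== CLAIM (what is proved, stated in full; the proofs are below) =====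
def Claim_equal_find_first_tag_pos : Prop := ∀ (text : String) (tags : List String), Dom_find_first_tag_pos text tags → Spec_find_first_tag_pos text tags (find_first_tag_pos text tags)

-- ===== LEMMAS AND PROOFS =====

-- the running-minimum step on already-collected hits (first minimal element wins)
def pvStep (b : Option (Int × String)) (e : Int × String) : Option (Int × String) :=
  match b with
  | none => some e
  | some p => if e.1 < p.1 then some e else some p

-- inserting into a list moves the head exactly as one pvStep
theorem head_insertBy (x : Int × String) (s : List (Int × String)) :
    (PySem.List.insertBy (fun a b => decide (a.1 < b.1)) x s).head? = pvStep s.head? x := by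
  cases s with
  | nil => simp [PySem.List.insertBy, pvStep]
  | cons y ys =>
    simp only [PySem.List.insertBy, pvStep]
    by_cases h : x.1 < y.1 <;> simp [h]

-- head of the insertBy-fold = pvStep-fold of the heads
theorem head_foldl_insertBy (l : List (Int × String)) (acc : List (Int × String)) :
    (l.foldl (fun acc x => PySem.List.insertBy (fun a b => decide (a.1 < b.1)) x acc) acc).head?
      = l.foldl pvStep acc.head? := by
  induction l generalizing acc with
  | nil => rfl
  | cons x t ih => simp only [List.foldl_cons, ih, head_insertBy]

-- head of the stable sort by index = running minimum (first minimal wins)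
theorem head_sorted_eq_foldl_min (l : List (Int × String)) :
    (PySem.List.sorted l (fun x => x.1)).head? = l.foldl pvStep none := by
  rw [PySem.List.sorted_eq_foldl_insertBy, head_foldl_insertBy]
  rfl

-- pyGet? at 0 is head?
theorem pyGet?_zero (l : List (Int × String)) : PySem.List.pyGet? l 0 = l.head? := by
  cases l <;> simp [PySem.List.pyGet?, PySem.List.pyIdx?]

-- the list of (find-index, tag) hits, tag order preserved
def pvFound (text : String) (tags : List String) : List (Int × String) :=
  match tags with
  | [] => []
  | t :: ts =>
    if PySem.Str.find text t ≥ 0 then (PySem.Str.find text t, t) :: pvFound text ts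
    else pvFound text ts

-- B's per-tag update equals one pvStep when the tag occurs …
theorem step_eq_pos (text t : String) (b : Option (Int × String)) (h : PySem.Str.find text t ≥ 0) :
    pvAltStep text b t = pvStep b (PySem.Str.find text t, t) := by
  have h0 : 0 ≤ PySem.Chars.find text.toList t.toList := by simpa using h
  cases b with
  | none => simp [pvAltStep, pvStep, h0]
  | some p =>
    by_cases hlt : PySem.Chars.find text.toList t.toList < p.1 <;>
      simp [pvAltStep, pvStep, h0, hlt]

-- … and is the identity when it does not
theorem step_eq_neg (text t : String) (b : Option (Int × String)) (h : ¬ PySem.Str.find text t ≥ 0) :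
    pvAltStep text b t = b := by
  have h0 : ¬ 0 ≤ PySem.Chars.find text.toList t.toList := by simpa using h
  simp [pvAltStep, h0]

-- B's fold over tags = pvStep-fold over the hit list
theorem alt_eq_foldl_found (text : String) (tags : List String) (b : Option (Int × String)) :
    tags.foldl (pvAltStep text) b = (pvFound text tags).foldl pvStep b := by
  induction tags generalizing b with
  | nil => rfl
  | cons t ts ih =>
    by_cases h : PySem.Str.find text t ≥ 0
    · rw [List.foldl_cons, step_eq_pos text t b h, pvFound, if_pos h, List.foldl_cons]
      exact ih _
    · rw [List.foldl_cons, step_eq_neg text t b h, pvFound, if_neg h]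
      exact ih b

-- A's 'found' accumulator is the hit list
theorem found_eq (text : String) (tags : List String) (acc : List (Int × String)) :
    tags.foldl (fun acc tag =>
      let idx := PySem.Str.find text tag
      if idx ≥ 0 then acc ++ [(idx, tag)] else acc) acc
    = acc ++ pvFound text tags := by
  induction tags generalizing acc with
  | nil => simp [pvFound]
  | cons t ts ih =>
    by_cases h : PySem.Str.find text t ≥ 0
    · rw [List.foldl_cons]
      show List.foldl _ (if PySem.Str.find text t ≥ 0 then acc ++ [(PySem.Str.find text t, t)] else acc) ts = _
      rw [if_pos h, ih, pvFound, if_pos h]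
      simp
    · rw [List.foldl_cons]
      show List.foldl _ (if PySem.Str.find text t ≥ 0 then acc ++ [(PySem.Str.find text t, t)] else acc) ts = _
      rw [if_neg h, ih, pvFound, if_neg h]

-- ===== VERDICT (by name: the statement is the Claim_ definition above) =====
theorem find_first_tag_pos_spec : Claim_equal_find_first_tag_pos := by
  intro text tags _
  unfold Spec_find_first_tag_pos find_first_tag_pos find_first_tag_pos_alt
  simp only [found_eq, alt_eq_foldl_found, List.nil_append]
  by_cases hnil : pvFound text tags = []
  · simp [hnil]
  · rw [if_neg hnil, pyGet?_zero, head_sorted_eq_foldl_min]
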